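-- pv_equiv track=rewrite | github.com/bruno185/OBJ-3D-Display | FixedPoint/center_scale_obj.py | check_fixed32_limits
-- ===== SOURCE A (Python) =====
-- def check_fixed32_limits(vertices, limit=32767):
--     """
--     Verify that all coordinates fit within Fixed32 limits
--     Range: [-32768, +32767]
--
--     Parameters:
--         vertices: list of vertices [[x, y, z], ...]
--         limit: positive limit (default: 32767)
--
--     Returns:
--         tuple: (is_valid, min_val, max_val, out_of_range_count)
--         - is_valid: True if all coordinates are within limits
--         - min_val: minimum value found
--         - max_val: maximum value found
--         - out_of_range_count: number of invalid coordinates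
--     """
--     # Collect all coordinates into a single list
--     all_coords = []
--     for v in vertices:
--         all_coords.extend(v)  # Add x, y, z
--
--     # Special case: no coordinates
--     if not all_coords:
--         return True, 0, 0, 0
--
--     # Find min and max
--     min_val = min(all_coords)
--     max_val = max(all_coords)
--
--     # Count how many coordinates exceed the limits
--     out_of_range = sum(1 for c in all_coords if c < -limit-1 or c > limit)
--
--     # Verify all coordinates are within [-32768, +32767]
--     is_valid = (min_val >= -limit-1) and (max_val <= limit)
--
--     return is_valid, min_val, max_val, out_of_range
-- ===== SOURCE B (Python) =====
-- def check_fixed32_limits(vertices, limit=32767):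
--     """Single pass over all coordinates: maintains min, max and the
--     out-of-range count together; is_valid == (no coordinate out of range)."""
--     lo = hi = None
--     bad = 0
--     for v in vertices:
--         for c in v:
--             if lo is None:
--                 lo = hi = c
--             else:
--                 if c < lo:
--                     lo = c
--                 if c > hi:
--                     hi = c
--             if c < -limit - 1 or c > limit:
--                 bad += 1
--     if lo is None:
--         return True, 0, 0, 0
--     return bad == 0, lo, hi, bad
-- ===== Notes on version B (the rewrite author's own statement) =====
-- stated objective: simpler
-- what changed: Replaces the flat-list build plus three separate passes (min, max, out-of-range sum) by one loop over the vertices that maintains min, max and the out-of-range count together, deriving is_valid as out_of_range == 0.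
import Mathlib
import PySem

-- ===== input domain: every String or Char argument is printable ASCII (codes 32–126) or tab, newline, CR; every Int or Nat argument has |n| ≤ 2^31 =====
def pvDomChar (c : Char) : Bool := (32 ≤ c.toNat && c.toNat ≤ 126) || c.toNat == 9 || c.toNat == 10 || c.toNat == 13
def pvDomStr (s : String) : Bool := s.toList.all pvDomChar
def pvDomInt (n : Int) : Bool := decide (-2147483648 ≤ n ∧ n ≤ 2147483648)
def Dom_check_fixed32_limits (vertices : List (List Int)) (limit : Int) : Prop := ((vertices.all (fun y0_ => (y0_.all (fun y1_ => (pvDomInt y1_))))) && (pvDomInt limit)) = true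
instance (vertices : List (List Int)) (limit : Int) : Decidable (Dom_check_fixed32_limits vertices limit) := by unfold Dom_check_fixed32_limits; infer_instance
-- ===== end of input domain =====

-- B replaces A's flat-list build plus separate min/max/sum passes by one loop that
-- maintains min, max and the out-of-range count together (is_valid = count == 0): simpler, O(1) extra space.

-- ===== PORT A =====
def check_fixed32_limits (vertices : List (List Int)) (limit : Int) : Bool × Int × Int × Int :=
  -- all_coords = []; for v in vertices: all_coords.extend(v)
  let all_coords := vertices.foldl (fun acc v => acc ++ v) []
  if all_coords = [] then (true, 0, 0, 0)
  else
    match PySem.List.min? all_coords (fun x => x), PySem.List.max? all_coords (fun x => x) with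
    | some min_val, some max_val =>
      -- sum(1 for c in all_coords if c < -limit-1 or c > limit)
      let out_of_range := all_coords.foldl
        (fun s c => if c < -limit - 1 ∨ c > limit then s + 1 else s) (0 : Int)
      (decide (min_val ≥ -limit - 1) && decide (max_val ≤ limit), min_val, max_val, out_of_range)
    | _, _ => (true, 0, 0, 0)  -- unreachable: all_coords ≠ []

-- ===== PORT B =====
-- one step of B's single pass: update (optional (min,max), bad-count) with coordinate c
def pvAltStep (limit : Int) (st : Option (Int × Int) × Int) (c : Int) : Option (Int × Int) × Int :=
  let mm :=
    match st.1 with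
    | none => (c, c)
    | some (lo, hi) => ((if c < lo then c else lo), (if c > hi then c else hi))
  (some mm, if c < -limit - 1 ∨ c > limit then st.2 + 1 else st.2)

def check_fixed32_limits_alt (vertices : List (List Int)) (limit : Int) : Bool × Int × Int × Int :=
  let st := vertices.foldl (fun s v => v.foldl (pvAltStep limit) s)
    ((none : Option (Int × Int)), (0 : Int))
  match st with
  | (none, _) => (true, 0, 0, 0)
  | (some (lo, hi), bad) => (decide (bad = 0), lo, hi, bad)

-- ===== PRECONDITION & SPEC =====
def Spec_check_fixed32_limits (vertices : List (List Int)) (limit : Int) (out : Bool × Int × Int × Int) : Prop := out = check_fixed32_limits_alt vertices limit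
instance (vertices : List (List Int)) (limit : Int) (out : Bool × Int × Int × Int) : Decidable (Spec_check_fixed32_limits vertices limit out) := by unfold Spec_check_fixed32_limits; infer_instance

-- ===== CLAIM (what is proved, stated in full; the proofs are below) =====
def Claim_equal_check_fixed32_limits : Prop := ∀ (vertices : List (List Int)) (limit : Int), Dom_check_fixed32_limits vertices limit → Spec_check_fixed32_limits vertices limit (check_fixed32_limits vertices limit)

-- ===== LEMMAS AND PROOFS =====

theorem pvFoldlAppend (vertices : List (List Int)) :
    ∀ (init : List Int), vertices.foldl (fun acc v => acc ++ v) init = init ++ vertices.flatten := by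
  induction vertices with
  | nil => simp
  | cons v t ih => intro init; simp [List.foldl_cons, ih]

theorem pvNestedFoldl (vertices : List (List Int)) (limit : Int) :
    ∀ (s : Option (Int × Int) × Int),
      vertices.foldl (fun s v => v.foldl (pvAltStep limit) s) s
        = vertices.flatten.foldl (pvAltStep limit) s := by
  induction vertices with
  | nil => simp
  | cons v t ih => intro s; simp [List.foldl_cons, List.foldl_append, ih]

theorem pvCntShift (limit : Int) (xs : List Int) :
    ∀ (b : Int), xs.foldl (fun s c => if c < -limit - 1 ∨ c > limit then s + 1 else s) b
      = b + ((xs.filter (fun c => decide (c < -limit - 1 ∨ c > limit))).length : Int) := by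
  induction xs with
  | nil => simp
  | cons c t ih =>
    intro b
    by_cases h : c < -limit - 1 ∨ c > limit <;>
      simp [List.foldl_cons, h, ih]; omega

theorem pvStepInv (limit : Int) (xs : List Int) :
    ∀ (lo hi bad : Int),
      xs.foldl (pvAltStep limit) (some (lo, hi), bad)
        = (some (xs.foldl min lo, xs.foldl max hi),
           xs.foldl (fun s c => if c < -limit - 1 ∨ c > limit then s + 1 else s) bad) := by
  induction xs with
  | nil => simp
  | cons c t ih =>
    intro lo hi bad
    have hmin : (if c < lo then c else lo) = min lo c := by
      rw [Int.min_def]; split_ifs <;> omega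
    have hmax : (if c > hi then c else hi) = max hi c := by
      rw [Int.max_def]; split_ifs <;> omega
    simp only [List.foldl_cons, pvAltStep, hmin, hmax, ih]

theorem pvLeFoldlMin (t : List Int) :
    ∀ (c L : Int), (L ≤ t.foldl min c) ↔ (L ≤ c ∧ ∀ x ∈ t, L ≤ x) := by
  induction t with
  | nil => simp
  | cons x t ih =>
    intro c L
    simp only [List.foldl_cons, ih, le_min_iff, List.mem_cons]
    aesop

theorem pvFoldlMaxLe (t : List Int) :
    ∀ (c L : Int), (t.foldl max c ≤ L) ↔ (c ≤ L ∧ ∀ x ∈ t, x ≤ L) := by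
  induction t with
  | nil => simp
  | cons x t ih =>
    intro c L
    simp only [List.foldl_cons, ih, max_le_iff, List.mem_cons]
    aesop

-- ===== VERDICT (by name: the statement is the Claim_ definition above) =====
theorem check_fixed32_limits_spec : Claim_equal_check_fixed32_limits := by
  intro vertices limit _
  unfold Spec_check_fixed32_limits check_fixed32_limits check_fixed32_limits_alt
  simp only [pvFoldlAppend, List.nil_append, pvNestedFoldl]
  cases hfl : vertices.flatten with
  | nil => simp [List.foldl_nil]
  | cons c t =>
    simp only [List.foldl_cons, reduceCtorEq, if_false,
      PySem.List.min?_id_cons, PySem.List.max?_id_cons]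
    have hstep0 : pvAltStep limit ((none : Option (Int × Int)), (0 : Int)) c
        = (some (c, c), if c < -limit - 1 ∨ c > limit then (0 : Int) + 1 else 0) := by
      simp [pvAltStep]
    rw [hstep0, pvStepInv]
    have hiff : (t.foldl (fun s c => if c < -limit - 1 ∨ c > limit then s + 1 else s)
          (if c < -limit - 1 ∨ c > limit then (0 : Int) + 1 else 0) = 0)
        ↔ (t.foldl min c ≥ -limit - 1 ∧ t.foldl max c ≤ limit) := by
      have : (if c < -limit - 1 ∨ c > limit then (0 : Int) + 1 else 0)
          = List.foldl (fun s c => if c < -limit - 1 ∨ c > limit then s + 1 else s) 0 [c] := by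
        simp
      rw [this, ← List.foldl_append]
      rw [pvCntShift]
      simp only [ge_iff_le, pvLeFoldlMin, pvFoldlMaxLe]
      constructor
      · intro h
        have hlen : ([c] ++ t).filter (fun c => decide (c < -limit - 1 ∨ c > limit)) = [] := by
          have : (([c] ++ t).filter
              (fun c => decide (c < -limit - 1 ∨ c > limit))).length = 0 := by omega
          exact List.length_eq_zero_iff.mp this
        rw [List.filter_eq_nil_iff] at hlen
        have hall : ∀ x ∈ c :: t, -limit - 1 ≤ x ∧ x ≤ limit := by
          intro x hx
          have := hlen x (by simpa using hx)
          simp at this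
          omega
        refine ⟨⟨(hall c (by simp)).1, fun x hx => (hall x (by simp [hx])).1⟩,
          (hall c (by simp)).2, fun x hx => (hall x (by simp [hx])).2⟩
      · rintro ⟨⟨h1, h2⟩, h3, h4⟩
        have : ([c] ++ t).filter (fun c => decide (c < -limit - 1 ∨ c > limit)) = [] := by
          rw [List.filter_eq_nil_iff]
          intro x hx
          simp only [List.cons_append, List.nil_append, List.mem_cons] at hx
          rcases hx with rfl | hx
          · simp; omega
          · have := h2 x hx; have := h4 x hx; simp; omega
        rw [this]; simp
    have : decide (t.foldl (fun s c => if c < -limit - 1 ∨ c > limit then s + 1 else s)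
          (if c < -limit - 1 ∨ c > limit then (0 : Int) + 1 else 0) = 0)
        = (decide (t.foldl min c ≥ -limit - 1) && decide (t.foldl max c ≤ limit)) := by
      rw [← Bool.decide_and, decide_eq_decide]
      exact hiff
    rw [← this]
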